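-- pv_equiv track=rewrite | github.com/longfinnish/Corridor-Map | scripts/fetch_gasquest_data.py | find_structured_file
-- ===== SOURCE A (Python) =====
-- def find_structured_file(report_files, prefer_ext='.tab'):
--     """Pick the structured file (.TAB or .CSV) from reportFiles, not the .pdf."""
--     if not report_files:
--         return None
--
--     # First pass: exact extension match
--     for rf in report_files:
--         fn = rf.get('fileName', '').lower()
--         if fn.endswith(prefer_ext):
--             return rf
--
--     # Second pass: any CSV
--     for rf in report_files:
--         fn = rf.get('fileName', '').lower()
--         if fn.endswith('.csv'):
--             return rf
--
--     # Third pass: any TAB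
--     for rf in report_files:
--         fn = rf.get('fileName', '').lower()
--         if fn.endswith('.tab'):
--             return rf
--
--     # Skip PDFs — return None if only PDFs available
--     for rf in report_files:
--         fn = rf.get('fileName', '').lower()
--         if not fn.endswith('.pdf'):
--             return rf
--
--     return None
-- ===== SOURCE B (Python) =====
-- def find_structured_file(report_files, prefer_ext='.tab'):
--     """Pick the structured file (.TAB or .CSV) from reportFiles, not the .pdf."""
--     if not report_files:
--         return None
--
--     def rank(rf):
--         fn = rf.get('fileName', '').lower()
--         if fn.endswith(prefer_ext):
--             return 1
--         if fn.endswith('.csv'):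
--             return 2
--         if fn.endswith('.tab'):
--             return 3
--         if not fn.endswith('.pdf'):
--             return 4
--         return 5
--
--     best = min(report_files, key=rank)
--     return None if rank(best) == 5 else best
-- ===== Notes on version B (the rewrite author's own statement) =====
-- stated objective: simpler
-- what changed: Replaces A's four sequential scans with a single priority rank per file and one min-by-key pass (min keeps the first element of the best tier, matching A's tie-breaking).
import Mathlib
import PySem

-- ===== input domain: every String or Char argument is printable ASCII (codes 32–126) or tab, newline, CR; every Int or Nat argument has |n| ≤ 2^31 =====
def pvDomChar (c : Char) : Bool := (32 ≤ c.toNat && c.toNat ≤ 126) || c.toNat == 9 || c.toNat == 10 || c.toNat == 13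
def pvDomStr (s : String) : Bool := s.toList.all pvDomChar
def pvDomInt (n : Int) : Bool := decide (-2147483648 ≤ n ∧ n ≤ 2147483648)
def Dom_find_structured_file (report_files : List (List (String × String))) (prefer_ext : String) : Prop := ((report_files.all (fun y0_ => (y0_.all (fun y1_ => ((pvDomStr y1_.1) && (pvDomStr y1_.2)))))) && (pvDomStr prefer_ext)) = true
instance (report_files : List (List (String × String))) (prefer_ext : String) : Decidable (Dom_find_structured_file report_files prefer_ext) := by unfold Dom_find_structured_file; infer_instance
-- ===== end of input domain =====

-- B replaces A's four sequential scans with one rank-per-file and a single min-by-key pass (simpler; same results).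

-- ===== PORT A =====
-- fn = rf.get('fileName', '').lower()  (shared by both ports, both Pythons compute it the same way)
def pvFn (rf : List (String × String)) : String :=
  PySem.Str.lower ((PySem.Dict.mk rf).getD "fileName" "")

def find_structured_file (report_files : List (List (String × String))) (prefer_ext : String) : Option (List (String × String)) :=
  if report_files.isEmpty then none
  else
    match report_files.find? (fun rf => PySem.Str.endswith (pvFn rf) prefer_ext) with
    | some rf => some rf
    | none =>
      match report_files.find? (fun rf => PySem.Str.endswith (pvFn rf) ".csv") with
      | some rf => some rf
      | none =>
        match report_files.find? (fun rf => PySem.Str.endswith (pvFn rf) ".tab") with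
        | some rf => some rf
        | none =>
          match report_files.find? (fun rf => !PySem.Str.endswith (pvFn rf) ".pdf") with
          | some rf => some rf
          | none => none

-- ===== PORT B =====
def pvRank (prefer_ext : String) (rf : List (String × String)) : Nat :=
  if PySem.Str.endswith (pvFn rf) prefer_ext then 1
  else if PySem.Str.endswith (pvFn rf) ".csv" then 2
  else if PySem.Str.endswith (pvFn rf) ".tab" then 3
  else if !PySem.Str.endswith (pvFn rf) ".pdf" then 4
  else 5

-- min(report_files, key=rank): Python's min keeps the FIRST element attaining the minimum key
def pvMinBy {α : Type} (rk : α → Nat) (best : α) : List α → α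
  | [] => best
  | x :: xs => pvMinBy rk (if rk x < rk best then x else best) xs

def find_structured_file_alt (report_files : List (List (String × String))) (prefer_ext : String) : Option (List (String × String)) :=
  match report_files with
  | [] => none
  | h :: t =>
    let best := pvMinBy (pvRank prefer_ext) h t
    if pvRank prefer_ext best = 5 then none else some best

-- ===== PRECONDITION & SPEC =====
def Spec_find_structured_file (report_files : List (List (String × String))) (prefer_ext : String) (out : Option (List (String × String))) : Prop := out = find_structured_file_alt report_files prefer_ext
instance (report_files : List (List (String × String))) (prefer_ext : String) (out : Option (List (String × String))) : Decidable (Spec_find_structured_file report_files prefer_ext out) := by unfold Spec_find_structured_file; infer_instance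

-- ===== CLAIM (what is proved, stated in full; the proofs are below) =====
def Claim_equal_find_structured_file : Prop := ∀ (report_files : List (List (String × String))) (prefer_ext : String), Dom_find_structured_file report_files prefer_ext → Spec_find_structured_file report_files prefer_ext (find_structured_file report_files prefer_ext)

-- ===== LEMMAS AND PROOFS =====

lemma rank_ge1 (pe : String) (x : List (String × String)) : 1 ≤ pvRank pe x := by
  unfold pvRank; split_ifs <;> omega

lemma rank_le1 (pe : String) (x : List (String × String)) :
    decide (pvRank pe x ≤ 1) = PySem.Str.endswith (pvFn x) pe := by
  unfold pvRank; split_ifs <;> simp_all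

lemma rank_le2 (pe : String) (x : List (String × String)) :
    decide (pvRank pe x ≤ 2) = (PySem.Str.endswith (pvFn x) pe || PySem.Str.endswith (pvFn x) ".csv") := by
  unfold pvRank; split_ifs <;> simp_all

lemma rank_le3 (pe : String) (x : List (String × String)) :
    decide (pvRank pe x ≤ 3) = (PySem.Str.endswith (pvFn x) pe || PySem.Str.endswith (pvFn x) ".csv" || PySem.Str.endswith (pvFn x) ".tab") := by
  unfold pvRank; split_ifs <;> simp_all

lemma rank_le4 (pe : String) (x : List (String × String)) :
    decide (pvRank pe x ≤ 4) = (PySem.Str.endswith (pvFn x) pe || PySem.Str.endswith (pvFn x) ".csv" || PySem.Str.endswith (pvFn x) ".tab" || !PySem.Str.endswith (pvFn x) ".pdf") := by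
  unfold pvRank; split_ifs <;> simp_all

lemma rank_eq5 (pe : String) (x : List (String × String))
    (h1 : PySem.Str.endswith (pvFn x) pe = false)
    (h2 : PySem.Str.endswith (pvFn x) ".csv" = false)
    (h3 : PySem.Str.endswith (pvFn x) ".tab" = false)
    (h4 : (!PySem.Str.endswith (pvFn x) ".pdf") = false) : pvRank pe x = 5 := by
  unfold pvRank
  simp only [h1, h2, h3, h4, Bool.false_eq_true, if_false]

lemma pvMinBy_min {α : Type} (rk : α → Nat) (l : List α) :
    ∀ (h x : α), x ∈ h :: l → rk (pvMinBy rk h l) ≤ rk x := by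
  induction l with
  | nil =>
    intro h x hx
    simp at hx; subst hx; simp [pvMinBy]
  | cons a t ih =>
    intro h x hx
    by_cases hc : rk a < rk h
    · rw [show pvMinBy rk h (a :: t) = pvMinBy rk a t from by simp [pvMinBy, hc]]
      rcases List.mem_cons.mp hx with rfl | hx'
      · have h1 := ih a a (by simp); omega
      · exact ih a x hx'
    · rw [show pvMinBy rk h (a :: t) = pvMinBy rk h t from by simp [pvMinBy, hc]]
      rcases List.mem_cons.mp hx with rfl | hx'
      · exact ih x x (by simp)
      · rcases List.mem_cons.mp hx' with rfl | hx''
        · have h1 := ih h h (by simp); omega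
        · exact ih h x (List.mem_cons_of_mem _ hx'')

lemma pvMinBy_find {α : Type} (rk : α → Nat) (l : List α) :
    ∀ (h : α), (h :: l).find? (fun x => decide (rk x ≤ rk (pvMinBy rk h l))) = some (pvMinBy rk h l) := by
  induction l with
  | nil => intro h; simp [pvMinBy, List.find?]
  | cons a t ih =>
    intro h
    by_cases hc : rk a < rk h
    · rw [show pvMinBy rk h (a :: t) = pvMinBy rk a t from by simp [pvMinBy, hc]]
      have hFa : rk (pvMinBy rk a t) ≤ rk a := pvMinBy_min rk t a a (by simp)
      have hph : decide (rk h ≤ rk (pvMinBy rk a t)) = false := by simp; omega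
      rw [List.find?_cons, hph]
      exact ih a
    · rw [show pvMinBy rk h (a :: t) = pvMinBy rk h t from by simp [pvMinBy, hc]]
      have hF := ih h
      have hFh : rk (pvMinBy rk h t) ≤ rk h := pvMinBy_min rk t h h (by simp)
      rw [List.find?_cons] at hF
      by_cases hph : decide (rk h ≤ rk (pvMinBy rk h t)) = true
      · rw [hph] at hF
        rw [List.find?_cons, hph]
        exact hF
      · have hphf : decide (rk h ≤ rk (pvMinBy rk h t)) = false := by
          cases hx : decide (rk h ≤ rk (pvMinBy rk h t)) <;> simp_all
        rw [hphf] at hF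
        have hpa : decide (rk a ≤ rk (pvMinBy rk h t)) = false := by
          simp at hphf ⊢; omega
        rw [List.find?_cons, hphf, List.find?_cons, hpa]
        exact hF

lemma find?_congr_mem {α : Type} (l : List α) (p q : α → Bool)
    (h : ∀ x ∈ l, p x = q x) : l.find? p = l.find? q := by
  induction l with
  | nil => rfl
  | cons a t ih =>
    rw [List.find?_cons, List.find?_cons, h a (by simp)]
    cases q a
    · exact ih (fun x hx => h x (List.mem_cons_of_mem _ hx))
    · rfl

-- ===== VERDICT (by name: the statement is the Claim_ definition above) =====
theorem find_structured_file_spec : Claim_equal_find_structured_file := by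
  intro rfs pe _
  unfold Spec_find_structured_file
  cases rfs with
  | nil => rfl
  | cons h t =>
    have hBalt : find_structured_file_alt (h :: t) pe =
        if pvRank pe (pvMinBy (pvRank pe) h t) = 5 then none else some (pvMinBy (pvRank pe) h t) := rfl
    rw [hBalt]
    unfold find_structured_file
    simp only [List.isEmpty_cons, Bool.false_eq_true, if_false]
    set F := pvMinBy (pvRank pe) h t with hFdef
    have hmin : ∀ x ∈ h :: t, pvRank pe F ≤ pvRank pe x := pvMinBy_min (pvRank pe) t h
    have hfind := pvMinBy_find (pvRank pe) t h
    rw [← hFdef] at hfind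
    have hFmem : F ∈ h :: t := List.mem_of_find?_eq_some hfind
    have hF1 : 1 ≤ pvRank pe F := rank_ge1 pe F
    cases hA1 : (h :: t).find? (fun rf => PySem.Str.endswith (pvFn rf) pe) with
    | some x =>
      have hx1 : PySem.Str.endswith (pvFn x) pe = true := by
        have := List.find?_some hA1; simpa using this
      have hxle : pvRank pe x ≤ 1 := by
        have := rank_le1 pe x; rw [hx1] at this
        exact of_decide_eq_true this
      have hm1 : pvRank pe F = 1 :=
        Nat.le_antisymm (Nat.le_trans (hmin x (List.mem_of_find?_eq_some hA1)) hxle) hF1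
      have hp : (fun y => decide (pvRank pe y ≤ pvRank pe F)) = (fun rf => PySem.Str.endswith (pvFn rf) pe) := by
        funext y; rw [hm1, rank_le1]
      rw [hp, hA1] at hfind
      have hFx : F = x := by injection hfind.symm
      have h5 : ¬ pvRank pe x = 5 := by rw [← hFx, hm1]; omega
      rw [hFx, if_neg h5]
    | none =>
      have he1 : ∀ y ∈ h :: t, PySem.Str.endswith (pvFn y) pe = false := by
        intro y hy; have := List.find?_eq_none.mp hA1 y hy; simpa using this
      have hF2 : 2 ≤ pvRank pe F := by
        have hd := rank_le1 pe F
        rw [he1 F hFmem] at hd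
        have := of_decide_eq_false hd; omega
      cases hA2 : (h :: t).find? (fun rf => PySem.Str.endswith (pvFn rf) ".csv") with
      | some x =>
        have hx2 : PySem.Str.endswith (pvFn x) ".csv" = true := by
          have := List.find?_some hA2; simpa using this
        have hxmem := List.mem_of_find?_eq_some hA2
        have hxle : pvRank pe x ≤ 2 := by
          have hd := rank_le2 pe x; rw [he1 x hxmem, hx2] at hd
          exact of_decide_eq_true (by rw [hd]; rfl)
        have hm2 : pvRank pe F = 2 := Nat.le_antisymm (Nat.le_trans (hmin x hxmem) hxle) hF2
        have hcong : (h :: t).find? (fun y => decide (pvRank pe y ≤ pvRank pe F)) =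
            (h :: t).find? (fun rf => PySem.Str.endswith (pvFn rf) ".csv") := by
          apply find?_congr_mem
          intro y hy; rw [hm2, rank_le2, he1 y hy]; simp
        rw [hcong, hA2] at hfind
        have hFx : F = x := by injection hfind.symm
        have h5 : ¬ pvRank pe x = 5 := by rw [← hFx, hm2]; omega
        rw [hFx, if_neg h5]
      | none =>
        have he2 : ∀ y ∈ h :: t, PySem.Str.endswith (pvFn y) ".csv" = false := by
          intro y hy; have := List.find?_eq_none.mp hA2 y hy; simpa using this
        have hF3 : 3 ≤ pvRank pe F := by
          have hd := rank_le2 pe F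
          rw [he1 F hFmem, he2 F hFmem] at hd
          have := of_decide_eq_false (by rw [hd]; rfl : decide (pvRank pe F ≤ 2) = false)
          omega
        cases hA3 : (h :: t).find? (fun rf => PySem.Str.endswith (pvFn rf) ".tab") with
        | some x =>
          have hx3 : PySem.Str.endswith (pvFn x) ".tab" = true := by
            have := List.find?_some hA3; simpa using this
          have hxmem := List.mem_of_find?_eq_some hA3
          have hxle : pvRank pe x ≤ 3 := by
            have hd := rank_le3 pe x; rw [he1 x hxmem, he2 x hxmem, hx3] at hd
            exact of_decide_eq_true (by rw [hd]; rfl)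
          have hm3 : pvRank pe F = 3 := Nat.le_antisymm (Nat.le_trans (hmin x hxmem) hxle) hF3
          have hcong : (h :: t).find? (fun y => decide (pvRank pe y ≤ pvRank pe F)) =
              (h :: t).find? (fun rf => PySem.Str.endswith (pvFn rf) ".tab") := by
            apply find?_congr_mem
            intro y hy; rw [hm3, rank_le3, he1 y hy, he2 y hy]; simp
          rw [hcong, hA3] at hfind
          have hFx : F = x := by injection hfind.symm
          have h5 : ¬ pvRank pe x = 5 := by rw [← hFx, hm3]; omega
          rw [hFx, if_neg h5]
        | none =>
          have he3 : ∀ y ∈ h :: t, PySem.Str.endswith (pvFn y) ".tab" = false := by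
            intro y hy; have := List.find?_eq_none.mp hA3 y hy; simpa using this
          have hF4 : 4 ≤ pvRank pe F := by
            have hd := rank_le3 pe F
            rw [he1 F hFmem, he2 F hFmem, he3 F hFmem] at hd
            have := of_decide_eq_false (by rw [hd]; rfl : decide (pvRank pe F ≤ 3) = false)
            omega
          cases hA4 : (h :: t).find? (fun rf => !PySem.Str.endswith (pvFn rf) ".pdf") with
          | some x =>
            have hx4 : (!PySem.Str.endswith (pvFn x) ".pdf") = true := by
              have := List.find?_some hA4; simpa using this
            have hxmem := List.mem_of_find?_eq_some hA4
            have hxle : pvRank pe x ≤ 4 := by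
              have hd := rank_le4 pe x; rw [he1 x hxmem, he2 x hxmem, he3 x hxmem, hx4] at hd
              exact of_decide_eq_true (by rw [hd]; rfl)
            have hm4 : pvRank pe F = 4 := Nat.le_antisymm (Nat.le_trans (hmin x hxmem) hxle) hF4
            have hcong : (h :: t).find? (fun y => decide (pvRank pe y ≤ pvRank pe F)) =
                (h :: t).find? (fun rf => !PySem.Str.endswith (pvFn rf) ".pdf") := by
              apply find?_congr_mem
              intro y hy; rw [hm4, rank_le4, he1 y hy, he2 y hy, he3 y hy]; simp
            rw [hcong, hA4] at hfind
            have hFx : F = x := by injection hfind.symm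
            have h5 : ¬ pvRank pe x = 5 := by rw [← hFx, hm4]; omega
            rw [hFx, if_neg h5]
          | none =>
            have he4 : ∀ y ∈ h :: t, (!PySem.Str.endswith (pvFn y) ".pdf") = false := by
              intro y hy; have := List.find?_eq_none.mp hA4 y hy; simpa using this
            have hm5 : pvRank pe F = 5 :=
              rank_eq5 pe F (he1 F hFmem) (he2 F hFmem) (he3 F hFmem) (he4 F hFmem)
            simp [hm5]
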